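-- pv_equiv track=rewrite | github.com/gelileo/python101 | tmp/2048.py | merge_tiles
-- ===== SOURCE A (Python) =====
-- GRID_SIZE = 4
--
-- def merge_tiles(row):
--     new_row = [value for value in row if value != 0]
--     for i in range(len(new_row) - 1):
--         if new_row[i] == new_row[i + 1]:
--             new_row[i] *= 2
--             new_row[i + 1] = 0
--     new_row = [value for value in new_row if value != 0]
--     new_row.extend([0] * (GRID_SIZE - len(new_row)))
--     return new_row
-- ===== SOURCE B (Python) =====
-- GRID_SIZE = 4
--
-- def merge_tiles(row):
--     tiles = [v for v in row if v != 0]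
--     merged = []
--     i = 0
--     while i < len(tiles):
--         if i + 1 < len(tiles) and tiles[i] == tiles[i + 1]:
--             merged.append(tiles[i] * 2)
--             i += 2
--         else:
--             merged.append(tiles[i])
--             i += 1
--     return merged + [0] * (GRID_SIZE - len(merged))
-- ===== Notes on version B (the rewrite author's own statement) =====
-- stated objective: simpler
-- what changed: Replaced A's in-place index loop (merge into slot i, zero slot i+1, then re-filter zeros) by a recursive pair-consuming pass over the nonzero tiles that builds the merged list directly, so no zero bookkeeping or second filter is needed.
import Mathlib
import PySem

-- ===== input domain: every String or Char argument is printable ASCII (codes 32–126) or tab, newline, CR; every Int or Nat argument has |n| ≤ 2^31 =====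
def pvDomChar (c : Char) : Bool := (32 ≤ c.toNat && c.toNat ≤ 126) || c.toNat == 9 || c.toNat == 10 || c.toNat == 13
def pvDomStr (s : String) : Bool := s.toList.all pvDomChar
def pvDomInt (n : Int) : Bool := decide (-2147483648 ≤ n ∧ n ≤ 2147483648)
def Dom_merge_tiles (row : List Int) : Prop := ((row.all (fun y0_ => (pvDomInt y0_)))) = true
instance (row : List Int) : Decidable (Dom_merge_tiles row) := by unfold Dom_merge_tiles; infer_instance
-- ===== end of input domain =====

-- B replaces A's in-place merge-and-zero loop plus second zero filter by one
-- recursive pair-consuming pass building the merged list directly (simpler).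

-- ===== PORT A =====
-- one iteration of A's for-loop body at index i (in-place update via List.set)
def mtStep (l : List Int) (i : Nat) : List Int :=
  match l[i]?, l[i+1]? with
  | some a, some b => if a = b then (l.set i (a * 2)).set (i+1) 0 else l
  | _, _ => l

def merge_tiles (row : List Int) : List Int :=
  let nr1 := row.filter (fun v => v != 0)
  let nr2 := (List.range (nr1.length - 1)).foldl mtStep nr1
  let nr3 := nr2.filter (fun v => v != 0)
  nr3 ++ List.replicate (4 - nr3.length) 0

-- ===== PORT B =====
-- B's while loop: each iteration consumes one tile, or two equal tiles at once
-- (written as structural recursion on the unconsumed suffix)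
def mergeRun : List Int → List Int
  | [] => []
  | [a] => [a]
  | a :: b :: t => if a = b then a * 2 :: mergeRun t else a :: mergeRun (b :: t)

def merge_tiles_alt (row : List Int) : List Int :=
  let merged := mergeRun (row.filter (fun v => v != 0))
  merged ++ List.replicate (4 - merged.length) 0

-- ===== PRECONDITION & SPEC =====
def Spec_merge_tiles (row : List Int) (out : List Int) : Prop := out = merge_tiles_alt row
instance (row : List Int) (out : List Int) : Decidable (Spec_merge_tiles row out) := by unfold Spec_merge_tiles; infer_instance

-- ===== CLAIM (what is proved, stated in full; the proofs are below) =====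
def Claim_equal_merge_tiles : Prop := ∀ (row : List Int), Dom_merge_tiles row → Spec_merge_tiles row (merge_tiles row)

-- ===== LEMMAS AND PROOFS =====

theorem mtStep_cons_succ (c : Int) (l : List Int) (i : Nat) :
    mtStep (c :: l) (i + 1) = c :: mtStep l i := by
  cases h1 : l[i]? <;> cases h2 : l[i+1]? <;>
    first
      | (simp [mtStep, List.getElem?_cons_succ, h1, h2]; split <;> rfl)
      | simp [mtStep, List.getElem?_cons_succ, h1, h2]

theorem foldl_mtStep_shift (r : List Nat) (c : Int) (l : List Int) :
    List.foldl mtStep (c :: l) (r.map (· + 1)) = c :: List.foldl mtStep l r := by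
  induction r generalizing l with
  | nil => rfl
  | cons i r ih => simp only [List.map_cons, List.foldl_cons, mtStep_cons_succ, ih]

-- A's loop over the zero-free list, then filtering zeros, is B's mergeRun
theorem loop_filter_eq_mergeRun (xs : List Int) (h : ∀ x ∈ xs, x ≠ 0) :
    (List.foldl mtStep xs (List.range (xs.length - 1))).filter (fun v => v != 0)
      = mergeRun xs := by
  induction xs using mergeRun.induct with
  | case1 => rfl
  | case2 a =>
    simp [mergeRun, h a (by simp)]
  | case3 a t ih =>
    have ha : a ≠ 0 := h a (by simp)
    have ht : ∀ x ∈ t, x ≠ 0 := fun x hx => h x (by simp [hx])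
    have hrange : List.range ((a :: a :: t).length - 1) = 0 :: (List.range t.length).map (· + 1) := by
      simp [List.range_succ_eq_map, Nat.add_comm]
    rw [hrange]
    have hstep0 : mtStep (a :: a :: t) 0 = (a * 2) :: 0 :: t := by
      simp [mtStep, List.set]
    simp only [List.foldl_cons, hstep0]
    -- peel the head a*2
    rw [foldl_mtStep_shift]
    have inner : List.foldl mtStep (0 :: t) (List.range t.length)
        = 0 :: List.foldl mtStep t (List.range (t.length - 1)) := by
      cases t with
      | nil => rfl
      | cons h' t' =>
        have hh' : h' ≠ 0 := ht h' (by simp)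
        have : List.range (h' :: t').length = 0 :: (List.range t'.length).map (· + 1) := by
          simp [List.range_succ_eq_map]
        rw [this]
        have hstep : mtStep (0 :: h' :: t') 0 = 0 :: h' :: t' := by
          simp [mtStep, (Ne.symm hh')]
        simp [List.foldl_cons, hstep, foldl_mtStep_shift]
    rw [inner]
    have h2a : (a * 2 : Int) ≠ 0 := by exact mul_ne_zero ha (by norm_num)
    simp [h2a, ih ht, mergeRun]
  | case4 a b t hab ih =>
    have ha : a ≠ 0 := h a (by simp)
    have hbt : ∀ x ∈ b :: t, x ≠ 0 := fun x hx => h x (by simp at hx; rcases hx with h'|h' <;> simp [h'])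
    have hrange : List.range ((a :: b :: t).length - 1) = 0 :: (List.range t.length).map (· + 1) := by
      simp [List.range_succ_eq_map, Nat.add_comm]
    rw [hrange]
    have hstep0 : mtStep (a :: b :: t) 0 = a :: b :: t := by
      simp [mtStep, hab]
    simp only [List.foldl_cons, hstep0]
    rw [foldl_mtStep_shift]
    have ihs := ih hbt
    simp only [List.length_cons, Nat.add_sub_cancel] at ihs
    simp [ha, mergeRun, hab, ihs]

-- ===== VERDICT (by name: the statement is the Claim_ definition above) =====
theorem merge_tiles_spec : Claim_equal_merge_tiles := by
  intro row _
  unfold Spec_merge_tiles merge_tiles merge_tiles_alt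
  dsimp only
  have h : ∀ x ∈ row.filter (fun v => v != 0), x ≠ 0 := by
    intro x hx
    have := List.of_mem_filter hx
    simpa using this
  rw [loop_filter_eq_mergeRun _ h]
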